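-- pv_equiv track=rewrite | github.com/messeb/advent-of-code-2024 | 09/disk_fragmenter_part2.py | find_free_space_spans
-- ===== SOURCE A (Python) =====
-- def find_free_space_spans(disk_map):
--     """
--     Identify all contiguous spans of free space in the disk map.
--     Returns a list of tuples (start_index, length).
--     """
--     spans = []
--     start = None
--
--     for i, block in enumerate(disk_map):
--         if block == '.':
--             if start is None:
--                 start = i
--         else:
--             if start is not None:
--                 spans.append((start, i - start))
--                 start = None
--
--     if start is not None:  # Handle trailing free space
--         spans.append((start, len(disk_map) - start))
--
--     return spans
-- ===== SOURCE B (Python) =====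
-- def find_free_space_spans(disk_map):
--     """
--     Identify all contiguous spans of free space in the disk map.
--     Returns a list of tuples (start_index, length).
--     """
--     spans = []
--     n = len(disk_map)
--     i = 0
--     while i < n:
--         j = i + 1
--         while j < n and disk_map[j] == disk_map[i]:
--             j += 1
--         if disk_map[i] == '.':
--             spans.append((i, j - i))
--         i = j
--     return spans
-- ===== Notes on version B (the rewrite author's own statement) =====
-- stated objective: alternative
-- what changed: Replaces the per-element start-sentinel state machine (open/close a span on '.'/non-'.' boundaries plus a trailing fix-up) with a two-pointer run scan that finds each maximal run of equal blocks at once and emits the run directly when it is free space, with no carried state and no trailing special case.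
import Mathlib
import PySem

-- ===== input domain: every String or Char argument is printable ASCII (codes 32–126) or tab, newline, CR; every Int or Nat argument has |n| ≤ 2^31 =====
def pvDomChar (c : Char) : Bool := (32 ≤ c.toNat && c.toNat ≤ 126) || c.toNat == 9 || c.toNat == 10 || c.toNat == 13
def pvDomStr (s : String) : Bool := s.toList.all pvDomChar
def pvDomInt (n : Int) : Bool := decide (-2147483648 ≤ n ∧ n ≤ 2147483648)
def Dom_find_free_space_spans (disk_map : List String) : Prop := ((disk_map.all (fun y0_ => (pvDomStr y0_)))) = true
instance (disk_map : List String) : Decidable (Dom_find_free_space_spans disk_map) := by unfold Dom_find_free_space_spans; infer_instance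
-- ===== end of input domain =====

-- B replaces A's start-sentinel state machine by a two-pointer maximal-run scan; alternative decomposition, same O(n) cost.

-- ===== PORT A =====
-- the for-loop over enumerate(disk_map), carrying the state (spans, start, i)
def pvALoop (spans : List (Int × Int)) (start : Option Int) (i : Int) :
    List String → List (Int × Int) × Option Int
  | [] => (spans, start)
  | block :: rest =>
    if block == "." then
      match start with
      | none => pvALoop spans (some i) (i + 1) rest
      | some s => pvALoop spans (some s) (i + 1) rest
    else
      match start with
      | some s => pvALoop (spans ++ [(s, i - s)]) none (i + 1) rest
      | none => pvALoop spans none (i + 1) rest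

def find_free_space_spans (disk_map : List String) : List (Int × Int) :=
  match pvALoop [] none 0 disk_map with
  | (spans, some s) => spans ++ [(s, (disk_map.length : Int) - s)]  -- handle trailing free space
  | (spans, none) => spans

-- ===== PORT B =====
-- the outer while-loop: at each step consume the whole maximal run of blocks equal to the head
def pvRuns : List String → Int → List (Int × Int)
  | [], _ => []
  | x :: xs, i =>
    let run := xs.takeWhile (fun y => y == x)      -- inner while: j advances past equal blocks
    let j := i + 1 + (run.length : Int)
    let rest := xs.dropWhile (fun y => y == x)
    if x == "." then (i, j - i) :: pvRuns rest j else pvRuns rest j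
termination_by xs _ => xs.length
decreasing_by
  all_goals
    simpa using Nat.lt_succ_of_le (List.length_dropWhile_le (fun y => y == x) xs)

def find_free_space_spans_alt (disk_map : List String) : List (Int × Int) :=
  pvRuns disk_map 0

-- ===== PRECONDITION & SPEC =====
def Spec_find_free_space_spans (disk_map : List String) (out : List (Int × Int)) : Prop := out = find_free_space_spans_alt disk_map
instance (disk_map : List String) (out : List (Int × Int)) : Decidable (Spec_find_free_space_spans disk_map out) := by unfold Spec_find_free_space_spans; infer_instance

-- ===== CLAIM (what is proved, stated in full; the proofs are below) =====
def Claim_equal_find_free_space_spans : Prop := ∀ (disk_map : List String), Dom_find_free_space_spans disk_map → Spec_find_free_space_spans disk_map (find_free_space_spans disk_map)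

-- ===== LEMMAS AND PROOFS =====

-- finishing step of A: close a still-open span at total length n
def pvFinish (n : Int) : List (Int × Int) × Option Int → List (Int × Int)
  | (spans, some s) => spans ++ [(s, n - s)]
  | (spans, none) => spans

-- what B produces while "inside" a free run that started at s, with the rest xs at position i
def pvDotCont (xs : List String) (i s : Int) : List (Int × Int) :=
  let d := ((xs.takeWhile (fun y => y == ".")).length : Int)
  (s, i + d - s) :: pvRuns (xs.dropWhile (fun y => y == ".")) (i + d)

theorem pvRuns_cons_ne (x : String) (xs : List String) (i : Int) (hx : (x == ".") = false) :
    pvRuns (x :: xs) i = pvRuns xs (i + 1) := by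
  cases xs with
  | nil => simp [pvRuns, hx]
  | cons y ys =>
    by_cases h : (y == x) = true
    · have hyx : y = x := by simpa using h
      subst hyx
      rw [pvRuns, pvRuns]
      simp only [List.takeWhile, List.dropWhile, h, hx, Bool.false_eq_true, if_false,
        List.length_cons]
      congr 1
      push_cast
      ring
    · have h' : (y == x) = false := by simpa using h
      rw [pvRuns]
      simp [List.takeWhile, List.dropWhile, h', hx]

theorem pvRuns_cons_dot (xs : List String) (i : Int) :
    pvRuns ("." :: xs) i = pvDotCont xs (i + 1) i := by
  rw [pvRuns]
  simp only [pvDotCont, BEq.rfl, if_true]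

theorem pvDotCont_cons_dot (xs : List String) (i s : Int) :
    pvDotCont ("." :: xs) i s = pvDotCont xs (i + 1) s := by
  simp only [pvDotCont, List.takeWhile, List.dropWhile, BEq.rfl, List.length_cons]
  push_cast
  ring_nf

theorem pvDotCont_cons_ne (x : String) (xs : List String) (i s : Int) (hx : (x == ".") = false) :
    pvDotCont (x :: xs) i s = (s, i - s) :: pvRuns xs (i + 1) := by
  simp only [pvDotCont, List.takeWhile, List.dropWhile, hx]
  rw [pvRuns_cons_ne x xs _ hx]
  norm_num

theorem pvLoop_main (xs : List String) :
    (∀ (i : Int) (spans : List (Int × Int)),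
        pvFinish (i + xs.length) (pvALoop spans none i xs) = spans ++ pvRuns xs i) ∧
    (∀ (i s : Int) (spans : List (Int × Int)),
        pvFinish (i + xs.length) (pvALoop spans (some s) i xs) = spans ++ pvDotCont xs i s) := by
  induction xs with
  | nil =>
    constructor
    · intro i spans; simp [pvALoop, pvFinish, pvRuns]
    · intro i s spans; simp [pvALoop, pvFinish, pvDotCont, pvRuns]
  | cons x xs ih =>
    have hlen : ∀ (i : Int), i + ((x :: xs).length : Int) = (i + 1) + (xs.length : Int) := by
      intro i; simp only [List.length_cons]; push_cast; ring
    constructor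
    · intro i spans
      rw [hlen]
      by_cases hx : (x == ".") = true
      · have hx' : x = "." := by simpa using hx
        subst hx'
        rw [pvALoop]
        simp only [if_pos hx]
        rw [pvRuns_cons_dot]
        exact ih.2 (i + 1) i spans
      · have hx' : (x == ".") = false := by simpa using hx
        rw [pvALoop]
        simp only [hx', Bool.false_eq_true, if_neg, not_false_iff]
        rw [pvRuns_cons_ne x xs i hx']
        exact ih.1 (i + 1) spans
    · intro i s spans
      rw [hlen]
      by_cases hx : (x == ".") = true
      · have hx' : x = "." := by simpa using hx
        subst hx'
        rw [pvALoop]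
        simp only [if_pos hx]
        rw [pvDotCont_cons_dot]
        exact ih.2 (i + 1) s spans
      · have hx' : (x == ".") = false := by simpa using hx
        rw [pvALoop]
        simp only [hx', Bool.false_eq_true, if_neg, not_false_iff]
        rw [pvDotCont_cons_ne x xs i s hx']
        have := ih.1 (i + 1) (spans ++ [(s, i - s)])
        simpa [List.append_assoc] using this

-- ===== VERDICT (by name: the statement is the Claim_ definition above) =====
theorem find_free_space_spans_spec : Claim_equal_find_free_space_spans := by
  intro disk_map _
  unfold Spec_find_free_space_spans find_free_space_spans find_free_space_spans_alt
  have h := (pvLoop_main disk_map).1 0 []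
  simp only [Int.zero_add, List.nil_append] at h
  rw [← h]
  cases hA : pvALoop [] none 0 disk_map with
  | mk spans start =>
    cases start <;> simp [pvFinish]
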